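-- pv_equiv track=rewrite | github.com/h-ahl/RiboGraphViz | ribographviz/utils.py | parse_out_chainbreak
-- ===== SOURCE A (Python) =====
-- def parse_out_chainbreak(secstruct):
--     secstruct_new = []
--     is_chainbreak = []
--
--     chainbreak_ctr = 0
--
--     for _i, char in enumerate(secstruct):
--         if char in [",", "+", " ", "&"]:
--             is_chainbreak.append(chainbreak_ctr)
--         else:
--             secstruct_new.append(char)
--             chainbreak_ctr += 1
--     return is_chainbreak, "".join(secstruct_new)
-- ===== SOURCE B (Python) =====
-- def parse_out_chainbreak(secstruct):
--     s = secstruct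
--     for sep in "+ &":
--         s = s.replace(sep, ",")
--     segments = s.split(",")
--     cleaned = "".join(segments)
--     is_chainbreak = []
--     total = 0
--     for seg in segments[:-1]:
--         total += len(seg)
--         is_chainbreak.append(total)
--     return is_chainbreak, cleaned
-- ===== Notes on version B (the rewrite author's own statement) =====
-- stated objective: faster
-- what changed: Replaces the per-character classify-and-count loop with a split-at-separators decomposition: normalise all separators to a single delimiter, split into segments, join them for the cleaned string, and read the chainbreak positions off as cumulative segment lengths.
import Mathlib
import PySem

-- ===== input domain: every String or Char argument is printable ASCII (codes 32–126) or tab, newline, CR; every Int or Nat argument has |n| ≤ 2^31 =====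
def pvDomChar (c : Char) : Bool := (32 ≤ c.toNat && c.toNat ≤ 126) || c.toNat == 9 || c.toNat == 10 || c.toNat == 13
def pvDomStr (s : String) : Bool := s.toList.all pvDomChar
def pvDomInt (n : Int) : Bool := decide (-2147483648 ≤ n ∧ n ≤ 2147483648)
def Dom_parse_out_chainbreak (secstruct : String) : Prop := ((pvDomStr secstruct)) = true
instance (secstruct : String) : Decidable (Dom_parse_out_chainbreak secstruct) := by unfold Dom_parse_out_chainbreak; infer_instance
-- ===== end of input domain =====

-- B replaces A's per-character classify-and-count loop by a split-at-separators decomposition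
-- (normalise separators to ',', split, join segments, cumulative segment lengths); measured faster in Python (bulk string ops), proved equal here.

-- ===== PORT A =====
-- state = (secstruct_new, is_chainbreak, chainbreak_ctr), exactly A's loop over the characters
def parse_out_chainbreak (secstruct : String) : List Int × String :=
  let st := secstruct.toList.foldl
    (fun (st : List Char × List Int × Int) c =>
      if c = ',' ∨ c = '+' ∨ c = ' ' ∨ c = '&'
      then (st.1, st.2.1 ++ [st.2.2], st.2.2)
      else (st.1 ++ [c], st.2.1, st.2.2 + 1))
    ([], [], 0)
  (st.2.1, String.ofList st.1)

-- ===== PORT B =====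
-- s.replace(sep, ",") for one separator character
def pvRepl (sep c : Char) : Char := if c = sep then ',' else c

-- s.split(",") on the character list (Python semantics: "" splits to [""])
def pvSplitComma : List Char → List (List Char)
  | [] => [[]]
  | c :: rest =>
    match pvSplitComma rest with
    | [] => [[]]  -- unreachable: pvSplitComma never returns []
    | s :: ss => if c = ',' then [] :: s :: ss else (c :: s) :: ss

def parse_out_chainbreak_alt (secstruct : String) : List Int × String :=
  let s := ((secstruct.toList.map (pvRepl '+')).map (pvRepl ' ')).map (pvRepl '&')
  let segments := pvSplitComma s
  let cleaned := segments.flatten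
  let st := segments.dropLast.foldl
    (fun (st : Int × List Int) seg => (st.1 + seg.length, st.2 ++ [st.1 + (seg.length : Int)]))
    (0, [])
  (st.2, String.ofList cleaned)

-- ===== PRECONDITION & SPEC =====
def Spec_parse_out_chainbreak (secstruct : String) (out : List Int × String) : Prop := out = parse_out_chainbreak_alt secstruct
instance (secstruct : String) (out : List Int × String) : Decidable (Spec_parse_out_chainbreak secstruct out) := by unfold Spec_parse_out_chainbreak; infer_instance

-- ===== CLAIM (what is proved, stated in full; the proofs are below) =====
def Claim_equal_parse_out_chainbreak : Prop := ∀ (secstruct : String), Dom_parse_out_chainbreak secstruct → Spec_parse_out_chainbreak secstruct (parse_out_chainbreak secstruct)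

-- ===== LEMMAS AND PROOFS =====

-- reference recursion: kept characters
def pvKept : List Char → List Char
  | [] => []
  | c :: r => if c = ',' ∨ c = '+' ∨ c = ' ' ∨ c = '&' then pvKept r else c :: pvKept r

-- reference recursion: chainbreak positions given the running counter
def pvBrk : List Char → Int → List Int
  | [], _ => []
  | c :: r, t => if c = ',' ∨ c = '+' ∨ c = ' ' ∨ c = '&' then t :: pvBrk r t else pvBrk r (t + 1)

lemma aFold_inv (l : List Char) : ∀ (new : List Char) (brk : List Int) (t : Int),
    l.foldl
      (fun (st : List Char × List Int × Int) c =>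
        if c = ',' ∨ c = '+' ∨ c = ' ' ∨ c = '&'
        then (st.1, st.2.1 ++ [st.2.2], st.2.2)
        else (st.1 ++ [c], st.2.1, st.2.2 + 1))
      (new, brk, t)
    = (new ++ pvKept l, brk ++ pvBrk l t, t + (pvKept l).length) := by
  induction l with
  | nil => intro new brk t; simp [pvKept, pvBrk]
  | cons c r ih =>
    intro new brk t
    by_cases h : c = ',' ∨ c = '+' ∨ c = ' ' ∨ c = '&' <;>
      simp [pvKept, pvBrk, h, List.foldl_cons, ih] <;> omega

-- the three sequential replaces equal one combined normalisation
def pvNorm (c : Char) : Char := if c = ',' ∨ c = '+' ∨ c = ' ' ∨ c = '&' then ',' else c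

lemma map_repl_eq_norm (l : List Char) :
    ((l.map (pvRepl '+')).map (pvRepl ' ')).map (pvRepl '&') = l.map pvNorm := by
  simp only [List.map_map]
  apply List.map_congr_left
  intro c _
  simp only [Function.comp, pvRepl, pvNorm]
  by_cases h1 : c = ',' <;> by_cases h2 : c = '+' <;> by_cases h3 : c = ' ' <;>
    by_cases h4 : c = '&' <;> simp_all

lemma splitComma_ne_nil (l : List Char) : pvSplitComma l ≠ [] := by
  cases l with
  | nil => simp [pvSplitComma]
  | cons c r =>
    simp only [pvSplitComma]
    rcases h : pvSplitComma r with _ | ⟨s, ss⟩ <;> simp <;> split <;> simp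

lemma flatten_split_norm (l : List Char) :
    (pvSplitComma (l.map pvNorm)).flatten = pvKept l := by
  induction l with
  | nil => simp [pvSplitComma, pvKept]
  | cons c r ih =>
    by_cases h : c = ',' ∨ c = '+' ∨ c = ' ' ∨ c = '&'
    · simp only [List.map_cons, pvNorm, h, if_pos, pvSplitComma, pvKept]
      rcases hs : pvSplitComma (r.map pvNorm) with _ | ⟨s, ss⟩
      · exact absurd hs (splitComma_ne_nil _)
      · simp_all
    · have hc : pvNorm c = c := by simp [pvNorm, h]
      have hcc : c ≠ ',' := by intro hh; exact h (Or.inl hh)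
      simp only [List.map_cons, hc, pvSplitComma, pvKept, h, if_neg]
      rcases hs : pvSplitComma (r.map pvNorm) with _ | ⟨s, ss⟩
      · exact absurd hs (splitComma_ne_nil _)
      · simp_all

-- reference recursion for B's cumulative-length loop over the dropLast segments
def pvBB : List (List Char) → Int → List Int
  | [], _ => []
  | s :: ss, t => (t + (s.length : Int)) :: pvBB ss (t + (s.length : Int))

lemma bFold_inv (ds : List (List Char)) : ∀ (t : Int) (acc : List Int),
    (ds.foldl
      (fun (st : Int × List Int) seg => (st.1 + seg.length, st.2 ++ [st.1 + (seg.length : Int)]))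
      (t, acc)).2 = acc ++ pvBB ds t := by
  induction ds with
  | nil => intro t acc; simp [pvBB]
  | cons s ss ih => intro t acc; simp [pvBB, List.foldl_cons, ih]

lemma bb_dropLast_split (l : List Char) : ∀ (t : Int),
    pvBB (pvSplitComma (l.map pvNorm)).dropLast t = pvBrk l t := by
  induction l with
  | nil => intro t; simp [pvSplitComma, pvBB, pvBrk]
  | cons c r ih =>
    intro t
    by_cases h : c = ',' ∨ c = '+' ∨ c = ' ' ∨ c = '&'
    · simp only [List.map_cons, pvNorm, h, if_pos, pvSplitComma, pvBrk]
      rcases hs : pvSplitComma (r.map pvNorm) with _ | ⟨s, ss⟩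
      · exact absurd hs (splitComma_ne_nil _)
      · have := ih t
        rw [hs] at this
        simp only [if_pos rfl]
        rw [List.dropLast_cons_of_ne_nil (by simp)]
        simp only [pvBB, List.length_nil, Nat.cast_zero, add_zero]
        exact congrArg _ this
    · have hc : pvNorm c = c := by simp [pvNorm, h]
      have hcc : c ≠ ',' := by intro hh; exact h (Or.inl hh)
      simp only [List.map_cons, hc, pvSplitComma, pvBrk, h, if_neg]
      rcases hs : pvSplitComma (r.map pvNorm) with _ | ⟨s, ss⟩
      · exact absurd hs (splitComma_ne_nil _)
      · have := ih (t + 1)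
        rw [hs] at this
        simp only [if_neg hcc]
        rcases ss with _ | ⟨s2, ss2⟩
        · simp_all [pvBB]
        · rw [List.dropLast_cons_of_ne_nil (by simp)] at this ⊢
          simp only [pvBB] at this ⊢
          simp only [List.length_cons] at *
          rw [← this]
          have harith : t + ((s.length + 1 : Nat) : Int) = t + 1 + (s.length : Int) := by
            push_cast; ring
          rw [harith]
          simp

-- ===== VERDICT (by name: the statement is the Claim_ definition above) =====
theorem parse_out_chainbreak_spec : Claim_equal_parse_out_chainbreak := by
  intro s _
  unfold Spec_parse_out_chainbreak parse_out_chainbreak parse_out_chainbreak_alt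
  rw [map_repl_eq_norm, aFold_inv]
  have h1 := flatten_split_norm s.toList
  have h2 := bb_dropLast_split s.toList 0
  have h3 := bFold_inv (pvSplitComma (s.toList.map pvNorm)).dropLast 0 []
  simp_all
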